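-- pv_equiv track=rewrite | github.com/CwbyWifsy/SnapKit | src/snapkit/launcher.py | _has_args
-- ===== SOURCE A (Python) =====
-- def _has_args(command: str) -> bool:
--     """Check if command string contains arguments beyond the executable."""
--     in_quote = False
--     for ch in command:
--         if ch == '"':
--             in_quote = not in_quote
--         elif ch == " " and not in_quote:
--             return True
--     return False
-- ===== SOURCE B (Python) =====
-- def _has_args(command: str) -> bool:
--     """Check if command string contains arguments beyond the executable."""
--     # Segments at even indices of split('"') are exactly the unquoted regions.
--     return any(' ' in part for part in command.split('"')[::2])
-- ===== Notes on version B (the rewrite author's own statement) =====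
-- stated objective: idiomatic
-- what changed: Replaces the character-by-character quote-toggling state machine with a split on the quote character followed by a space scan over the even-indexed (unquoted) segments.
import Mathlib
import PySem

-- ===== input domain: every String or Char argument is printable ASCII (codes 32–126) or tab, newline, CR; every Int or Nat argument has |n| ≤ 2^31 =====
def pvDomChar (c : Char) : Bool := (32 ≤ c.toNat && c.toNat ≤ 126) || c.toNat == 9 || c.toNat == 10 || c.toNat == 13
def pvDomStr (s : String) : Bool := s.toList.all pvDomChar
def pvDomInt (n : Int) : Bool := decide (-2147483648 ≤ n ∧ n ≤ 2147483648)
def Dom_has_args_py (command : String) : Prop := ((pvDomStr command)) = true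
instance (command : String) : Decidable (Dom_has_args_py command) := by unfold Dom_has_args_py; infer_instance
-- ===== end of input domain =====

-- B replaces A's per-character quote-state machine with a split on '"' plus a
-- space scan over the even-indexed (unquoted) segments; objective: idiomatic.

-- ===== PORT A =====
-- the for-loop with its early return, as structural recursion over the characters
def hasArgsLoop : List Char → Bool → Bool
  | [], _ => false
  | ch :: rest, inQuote =>
    if ch = '"' then hasArgsLoop rest (!inQuote)
    else if ch = ' ' ∧ inQuote = false then true
    else hasArgsLoop rest inQuote

def has_args_py (command : String) : Bool := hasArgsLoop command.toList false

-- ===== PORT B =====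
-- parts[::2] — the even-indexed elements
def pvEvens {α : Type} : List α → List α
  | [] => []
  | [x] => [x]
  | x :: _ :: rest => x :: pvEvens rest

def has_args_py_alt (command : String) : Bool :=
  (pvEvens (command.toList.splitOn '"')).any (fun part => part.contains ' ')

-- ===== PRECONDITION & SPEC =====
def Spec_has_args_py (command : String) (out : Bool) : Prop := out = has_args_py_alt command
instance (command : String) (out : Bool) : Decidable (Spec_has_args_py command out) := by unfold Spec_has_args_py; infer_instance

-- ===== CLAIM (what is proved, stated in full; the proofs are below) =====
def Claim_equal_has_args_py : Prop := ∀ (command : String), Dom_has_args_py command → Spec_has_args_py command (has_args_py command)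

-- ===== LEMMAS AND PROOFS =====

-- the odd-indexed elements: what B's even-index scan becomes once a quote has been entered
def pvOdds {α : Type} : List α → List α
  | [] => []
  | _ :: rest => pvEvens rest

theorem pvEvens_cons {α : Type} (x : α) (xs : List α) : pvEvens (x :: xs) = x :: pvOdds xs := by
  cases xs <;> simp [pvEvens, pvOdds]

theorem splitOn_ne_nil (cs : List Char) : cs.splitOn '"' ≠ [] := by
  simp [List.splitOn]
  induction cs with
  | nil => simp [List.splitOnP, List.splitOnP.go]
  | cons c cs ih =>
    rw [List.splitOnP_cons]
    split
    · simp
    · cases h : List.splitOnP (· == '"') cs with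
      | nil => exact absurd h ih
      | cons a t => simp [List.modifyHead]

theorem splitOn_quote_cons (cs : List Char) :
    ('"' :: cs).splitOn '"' = [] :: cs.splitOn '"' := by
  simp [List.splitOn, List.splitOnP_cons]

theorem splitOn_other_cons (c : Char) (cs : List Char) (h : c ≠ '"') :
    (c :: cs).splitOn '"' = (cs.splitOn '"').modifyHead (List.cons c) := by
  simp [List.splitOn, List.splitOnP_cons, h]

-- main invariant: the loop from state q scans the even- (q = false) or odd- (q = true)
-- indexed segments of the split for a space
theorem loop_eq_scan (cs : List Char) (q : Bool) :
    hasArgsLoop cs q =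
      (if q then pvOdds (cs.splitOn '"') else pvEvens (cs.splitOn '"')).any
        (fun part => part.contains ' ') := by
  induction cs generalizing q with
  | nil =>
    cases q <;> simp [hasArgsLoop, List.splitOn, List.splitOnP, List.splitOnP.go, pvOdds, pvEvens]
  | cons c cs ih =>
    by_cases hq : c = '"'
    · subst hq
      rw [splitOn_quote_cons]
      cases q <;> simp [hasArgsLoop, pvEvens_cons, pvOdds, ih]
    · rw [splitOn_other_cons c cs hq]
      obtain ⟨h, t, hht⟩ : ∃ h t, cs.splitOn '"' = h :: t := by
        cases hcs : cs.splitOn '"' with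
        | nil => exact absurd hcs (splitOn_ne_nil cs)
        | cons a b => exact ⟨a, b, rfl⟩
      rw [hht, List.modifyHead]
      by_cases hsp : c = ' '
      · subst hsp
        cases q with
        | false => simp [hasArgsLoop, pvEvens_cons]
        | true =>
          simp only [hasArgsLoop, if_neg hq]
          rw [if_neg (by simp)]
          rw [ih true, hht]
          simp [pvOdds]
      · cases q with
        | false =>
          simp only [hasArgsLoop, if_neg hq]
          rw [if_neg (by simp [hsp])]
          rw [ih false, hht]
          simp [pvEvens_cons, pvOdds, Ne.symm hsp]
        | true =>
          simp only [hasArgsLoop, if_neg hq]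
          rw [if_neg (by simp)]
          rw [ih true, hht]
          simp [pvOdds]

-- ===== VERDICT (by name: the statement is the Claim_ definition above) =====
theorem has_args_py_spec : Claim_equal_has_args_py := by
  intro command _
  unfold Spec_has_args_py has_args_py has_args_py_alt
  simpa using loop_eq_scan command.toList false
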